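-- pv_equiv track=rewrite | github.com/kostiscpp/advent_of_code_2024 | 2_2.py | if_rm
-- ===== SOURCE A (Python) =====
-- def if_rm(i, l):
-- 	l_new = l[:i] + l[i+1:]
-- 	for i in range(len(l_new)-1):
-- 		d = l_new[i+1] - l_new[i]
-- 		if abs(d) > 3 or abs(d) < 1:
-- 			return False
-- 		if i < len(l_new)-2 and (d > 0) != (l_new[i+2] -  l_new[i+1] > 0):
-- 			return False
-- 	return True
-- ===== SOURCE B (Python) =====
-- def if_rm(i, l):
--     l_new = l[:i] + l[i+1:]
--     diffs = [b - a for a, b in zip(l_new, l_new[1:])]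
--     if any(abs(d) < 1 or abs(d) > 3 for d in diffs):
--         return False
--     return all(d > 0 for d in diffs) or all(d < 0 for d in diffs)
-- ===== Notes on version B (the rewrite author's own statement) =====
-- stated objective: simpler
-- what changed: Replaces A's single interleaved index loop with lookahead and early returns by a precomputed list of consecutive differences followed by two separate whole-list checks (magnitude bound, then uniform sign).
import Mathlib
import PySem

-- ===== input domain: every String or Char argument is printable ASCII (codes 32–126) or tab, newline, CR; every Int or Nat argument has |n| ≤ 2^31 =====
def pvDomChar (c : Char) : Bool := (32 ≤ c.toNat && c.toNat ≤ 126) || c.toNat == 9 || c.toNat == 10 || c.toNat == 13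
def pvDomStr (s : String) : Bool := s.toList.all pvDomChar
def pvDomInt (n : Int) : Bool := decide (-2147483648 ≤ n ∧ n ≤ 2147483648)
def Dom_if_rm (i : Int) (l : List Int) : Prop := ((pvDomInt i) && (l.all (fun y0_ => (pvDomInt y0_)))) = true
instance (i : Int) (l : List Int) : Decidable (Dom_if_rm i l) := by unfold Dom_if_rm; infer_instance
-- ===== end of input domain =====

-- B replaces A's interleaved index loop (with lookahead and early returns) by a
-- precomputed list of consecutive differences plus separate magnitude and sign checks;
-- objective: simpler. Python abs(d) with Nat bounds is ported as Int.natAbs (exact).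

-- ===== PORT A =====
-- loop of A: structural recursion over the same sliding window (every Python index
-- l_new[i], l_new[i+1], l_new[i+2] is in range, so list pattern matching is exact)
def if_rm_go (lnew : List Int) : Bool :=
  match lnew with
  | a :: b :: rest =>
    let d := b - a
    if 3 < d.natAbs ∨ d.natAbs < 1 then false
    else if (match rest with
             | c :: _ => (decide (0 < d) != decide (0 < c - b))
             | [] => false) then false
    else if_rm_go (b :: rest)
  | _ => true
termination_by lnew.length

def if_rm (i : Int) (l : List Int) : Bool :=
  let l_new := PySem.List.slice l none (some i) ++ PySem.List.slice l (some (i+1)) none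
  if_rm_go l_new

-- ===== PORT B =====
def if_rm_alt (i : Int) (l : List Int) : Bool :=
  let l_new := PySem.List.slice l none (some i) ++ PySem.List.slice l (some (i+1)) none
  let diffs := (l_new.zip (PySem.List.slice l_new (some 1) none)).map (fun p => p.2 - p.1)
  if diffs.any (fun d => d.natAbs < 1 || 3 < d.natAbs) then false
  else (diffs.all (fun d => 0 < d)) || (diffs.all (fun d => d < 0))

-- ===== PRECONDITION & SPEC =====
def Spec_if_rm (i : Int) (l : List Int) (out : Bool) : Prop := out = if_rm_alt i l
instance (i : Int) (l : List Int) (out : Bool) : Decidable (Spec_if_rm i l out) := by unfold Spec_if_rm; infer_instance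

-- ===== CLAIM (what is proved, stated in full; the proofs are below) =====
def Claim_equal_if_rm : Prop := ∀ (i : Int) (l : List Int), Dom_if_rm i l → Spec_if_rm i l (if_rm i l)

-- ===== LEMMAS AND PROOFS =====

-- ===== VERDICT (by name: the statement is the Claim_ definition above) =====
theorem go_eq (ln : List Int) :
    if_rm_go ln =
      (let diffs := (ln.zip ln.tail).map (fun p => p.2 - p.1)
       if diffs.any (fun d => d.natAbs < 1 || 3 < d.natAbs) then false
       else (diffs.all (fun d => 0 < d)) || (diffs.all (fun d => d < 0))) := by
  fun_induction if_rm_go ln with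
  | case1 a b rest d h =>
    simp only [d] at h
    have hb : ((b - a).natAbs < 1 || 3 < (b - a).natAbs) = true := by simp; omega
    simp only [List.tail_cons, List.zip_cons_cons, List.map_cons, List.any_cons, hb,
      Bool.true_or, if_true]
  | case2 a b rest d h1 h2 =>
    match rest with
    | [] => simp at h2
    | c :: r =>
      simp only [d] at h1 h2
      simp only [List.tail_cons, List.zip_cons_cons, List.map_cons, List.any_cons, List.all_cons]
      split
      · rfl
      · rename_i hcond
        simp only [Bool.or_eq_true, not_or, decide_eq_true_eq, Bool.not_eq_true] at hcond
        rw [bne_iff_ne] at h2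
        simp only [ne_eq, decide_eq_decide] at h2
        have hc : c - b ≠ 0 := by have := hcond.2.1.1; omega
        by_cases hp : 0 < b - a
        · have hq : ¬ 0 < c - b := fun hq => h2 ⟨fun _ => hq, fun _ => hp⟩
          simp [show ¬ b < c by omega, show ¬ b < a by omega]
        · have hq : 0 < c - b := by
            by_contra hh
            exact h2 ⟨fun hx => absurd hx hp, fun hx => absurd hx hh⟩
          simp [show ¬ a < b by omega, show ¬ c < b by omega]
  | case3 a b rest d h1 h2 ih =>
    rw [ih]
    match rest with
    | [] =>
      simp only [d] at h1
      simp
      omega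
    | c :: r =>
      simp only [d] at h1 h2
      simp only [List.tail_cons, List.zip_cons_cons, List.map_cons, List.any_cons, List.all_cons]
      have hba : ((b - a).natAbs < 1 || 3 < (b - a).natAbs) = false := by simp; omega
      simp only [hba, Bool.false_or]
      split
      · rfl
      · rename_i hcond
        simp only [Bool.not_eq_true, Bool.or_eq_false_iff, decide_eq_false_iff_not] at hcond
        have hc : c - b ≠ 0 := by have := hcond.1.1; omega
        simp only [Bool.not_eq_true, bne_eq_false_iff_eq, decide_eq_decide] at h2
        have hba' : b - a ≠ 0 := by omega
        by_cases hp : 0 < b - a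
        · have hq : 0 < c - b := h2.mp hp
          simp [show a < b by omega, show b < c by omega, show ¬ b < a by omega, show ¬ c < b by omega]
        · have hq : ¬ 0 < c - b := fun hq => hp (h2.mpr hq)
          simp [show ¬ a < b by omega, show ¬ b < c by omega, show b < a by omega, show c < b by omega]
  | case4 x hx =>
    match x, hx with
    | [], _ => simp
    | [a], _ => simp
    | a :: b :: r, hx => exact absurd rfl (hx a b r)

theorem if_rm_spec : Claim_equal_if_rm := by
  intro i l _
  unfold Spec_if_rm if_rm if_rm_alt
  simp only [PySem.List.slice_from_one]
  exact go_eq _
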